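-- pv_equiv track=rewrite | github.com/PritiAher/Multiview-Clustering | Fuzzy.py | getCrispValues
-- ===== SOURCE A (Python) =====
-- def getCrispValues(size,n):
--     indexlist=[]
--     div=int(size/n)
--     begin,end=0,0
--     for i in range(n):
--
--         rangelist=[]
--         if(i==(n-1)):
--             rangelist.append(begin)
--             rangelist.append(size-1)
--             indexlist.append(rangelist)
--         else:
--             rangelist.append(begin)
--             end=begin+div-1
--             rangelist.append(end)
--             indexlist.append(rangelist)
--             begin=end+1
--
--
--
--     return indexlist
-- ===== SOURCE B (Python) =====
-- def getCrispValues(size, n):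
--     # Stateless decomposition: each range is computed directly from its index;
--     # no begin/end accumulator threaded through the loop.
--     div = int(size / n)
--     return [[i * div, (i + 1) * div - 1] if i != n - 1 else [i * div, size - 1]
--             for i in range(n)]
-- ===== Notes on version B (the rewrite author's own statement) =====
-- stated objective: simpler
-- what changed: Replaces the stateful loop that threads begin/end between iterations with a single stateless comprehension computing each range [i*div, (i+1)*div-1] directly from its index.
import Mathlib
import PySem

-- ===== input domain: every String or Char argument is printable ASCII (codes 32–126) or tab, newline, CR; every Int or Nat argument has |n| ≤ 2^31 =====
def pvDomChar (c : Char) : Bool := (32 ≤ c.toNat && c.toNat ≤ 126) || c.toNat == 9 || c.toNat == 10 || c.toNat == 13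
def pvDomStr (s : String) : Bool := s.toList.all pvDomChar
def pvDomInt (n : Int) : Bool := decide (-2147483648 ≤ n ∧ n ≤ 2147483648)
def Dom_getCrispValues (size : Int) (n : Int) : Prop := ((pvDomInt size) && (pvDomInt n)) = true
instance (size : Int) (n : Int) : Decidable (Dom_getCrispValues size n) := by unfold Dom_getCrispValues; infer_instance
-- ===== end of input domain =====

-- B replaces A's begin/end accumulator with a stateless per-index formula (objective: simpler).

-- ===== PORT A =====
-- int(size/n): true division then truncation toward zero; on Dom (|size|,|n| ≤ 2^31) the float
-- quotient never rounds across an integer, so this equals Int.tdiv exactly.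
def getCrispValues (size : Int) (n : Int) : List (List Int) :=
  let d := Int.tdiv size n
  let s := (PySem.List.pyRange 0 n 1).foldl
    (fun (st : List (List Int) × Int × Int) i =>
      let indexlist := st.1
      let b := st.2.1
      let e := st.2.2
      if i = n - 1 then
        (indexlist ++ [[b, size - 1]], b, e)
      else
        let e' := b + d - 1
        (indexlist ++ [[b, e']], e' + 1, e'))
    ([], 0, 0)
  s.1

-- ===== PORT B =====
def getCrispValues_alt (size : Int) (n : Int) : List (List Int) :=
  -- int(size/n) = Int.tdiv on Dom, as in port A
  let d := Int.tdiv size n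
  (PySem.List.pyRange 0 n 1).map
    (fun i => if i ≠ n - 1 then [i * d, (i + 1) * d - 1] else [i * d, size - 1])

-- ===== PRECONDITION & SPEC =====
-- Pre_ excludes exactly n = 0, where A raises ZeroDivisionError.
def Pre_getCrispValues (size : Int) (n : Int) : Prop := n ≠ 0
instance (size : Int) (n : Int) : Decidable (Pre_getCrispValues size n) := by unfold Pre_getCrispValues; infer_instance
def pvWitness_getCrispValues : Int × Int := (10, 3)

def Spec_getCrispValues (size : Int) (n : Int) (out : List (List Int)) : Prop := out = getCrispValues_alt size n
instance (size : Int) (n : Int) (out : List (List Int)) : Decidable (Spec_getCrispValues size n out) := by unfold Spec_getCrispValues; infer_instance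

-- ===== CLAIM (what is proved, stated in full; the proofs are below) =====
def Claim_equal_getCrispValues : Prop := ∀ (size : Int) (n : Int), Dom_getCrispValues size n → Pre_getCrispValues size n → Spec_getCrispValues size n (getCrispValues size n)

-- ===== LEMMAS AND PROOFS =====

-- Invariant of A's loop on the first k iterations (k ≤ n-1, so the else branch always fires):
-- the accumulated list is B's map over the same prefix and begin has the closed form k*d.
theorem pvLoopInv (size n d : Int) (k : Nat) (hk : (k : Int) ≤ n - 1) :
    (PySem.List.pyRange 0 (k : Int) 1).foldl
      (fun (st : List (List Int) × Int × Int) i =>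
        if i = n - 1 then
          (st.1 ++ [[st.2.1, size - 1]], st.2.1, st.2.2)
        else
          (st.1 ++ [[st.2.1, st.2.1 + d - 1]], st.2.1 + d - 1 + 1, st.2.1 + d - 1))
      ([], 0, 0)
    = ((PySem.List.pyRange 0 (k : Int) 1).map
        (fun i => if i ≠ n - 1 then [i * d, (i + 1) * d - 1] else [i * d, size - 1]),
       (k : Int) * d, if k = 0 then 0 else (k : Int) * d - 1) := by
  induction k with
  | zero => simp [PySem.List.pyRange_one_eq_nil]
  | succ m ih =>
      have hm : (m : Int) ≤ n - 1 := by push_cast at hk ⊢; omega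
      have hne : (m : Int) ≠ n - 1 := by push_cast at hk; omega
      have hsplit : PySem.List.pyRange 0 ((m : Int) + 1) 1
          = PySem.List.pyRange 0 (m : Int) 1 ++ [(m : Int)] := by
        simpa using PySem.List.pyRange_one_succ_right (a := 0) (b := (m : Int)) (by positivity)
      rw [show ((Nat.succ m : Nat) : Int) = (m : Int) + 1 by push_cast; ring, hsplit,
        List.foldl_append, List.map_append, ih hm]
      simp only [List.foldl_cons, List.foldl_nil, List.map_cons, List.map_nil]
      rw [if_neg hne, if_pos hne]
      have e1 : (m : Int) * d + d - 1 = ((m : Int) + 1) * d - 1 := by ring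
      have e2 : (m : Int) * d + d - 1 + 1 = ((m : Int) + 1) * d := by ring
      rw [e2]
      simp [e1]

-- ===== VERDICT (by name: the statement is the Claim_ definition above) =====
theorem getCrispValues_spec : Claim_equal_getCrispValues := by
  intro size n _ hn
  unfold Spec_getCrispValues getCrispValues getCrispValues_alt
  rcases Int.lt_or_le n 0 with h | h
  · simp [PySem.List.pyRange_one_eq_nil (by omega : n ≤ 0)]
  · have hn1 : 0 < n := lt_of_le_of_ne h (Ne.symm hn)
    set d := Int.tdiv size n with hd
    have hsplit : PySem.List.pyRange 0 n 1
        = PySem.List.pyRange 0 (n - 1) 1 ++ [n - 1] := by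
      have := PySem.List.pyRange_one_succ_right (a := 0) (b := n - 1) (by omega)
      simpa [sub_add_cancel] using this
    have hk : ((n - 1).toNat : Int) = n - 1 := by omega
    have inv := pvLoopInv size n d (n - 1).toNat (by omega)
    rw [hk] at inv
    dsimp only
    rw [hsplit, List.foldl_append, List.map_append, inv]
    simp
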